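-- pv_equiv track=rewrite | github.com/ftessarowisecode/wise-transformers | examples/pytorch/text-classification/multiclass_dsbert.py | generate_taxonomy
-- ===== SOURCE A (Python) =====
-- def generate_taxonomy(categories):
--     taxonomy_dict = {}
--
--     for category in categories:
--         main_category, sub_category = category.split(" >> ")
--
--         if main_category not in taxonomy_dict:
--             taxonomy_dict[main_category] = [sub_category]
--         else:
--             taxonomy_dict[main_category].append(sub_category)
--
--     return taxonomy_dict
-- ===== SOURCE B (Python) =====
-- def generate_taxonomy(categories):
--     pairs = []
--     for category in categories:
--         main_category, sub_category = category.split(" >> ")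
--         pairs.append((main_category, sub_category))
--     keys = list(dict.fromkeys(m for m, _ in pairs))
--     return {k: [s for m, s in pairs if m == k] for k in keys}
-- ===== Notes on version B (the rewrite author's own statement) =====
-- stated objective: alternative
-- what changed: Instead of incrementally accumulating into a dict with a contains-check per element, B first splits all categories into (main, sub) pairs, deduplicates the main keys in first-occurrence order, and builds each dict entry in one comprehension gathering that key's sub-categories.
import Mathlib
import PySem

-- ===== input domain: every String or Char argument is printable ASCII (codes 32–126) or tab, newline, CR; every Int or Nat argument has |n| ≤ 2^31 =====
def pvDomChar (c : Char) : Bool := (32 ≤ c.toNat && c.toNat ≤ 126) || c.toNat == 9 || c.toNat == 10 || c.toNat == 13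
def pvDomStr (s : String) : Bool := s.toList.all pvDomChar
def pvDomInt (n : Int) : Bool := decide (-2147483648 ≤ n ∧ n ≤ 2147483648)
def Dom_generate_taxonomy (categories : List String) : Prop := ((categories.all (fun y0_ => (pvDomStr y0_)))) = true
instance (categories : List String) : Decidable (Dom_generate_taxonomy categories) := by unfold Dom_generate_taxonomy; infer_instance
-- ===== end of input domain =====

-- B replaces A's incremental dict accumulation by a split-all / dedup-keys / gather-per-key decomposition (alternative algorithm, same return value).
-- Pre_ excludes exactly the inputs where A raises ValueError (a category whose " >> " split does not have exactly two parts).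


-- ===== PORT A =====
def generate_taxonomy (categories : List String) : List (String × List String) :=
  (categories.foldl (fun taxonomy_dict category =>
      match (PySem.Str.split? category " >> ").getD [] with
      | [main_category, sub_category] =>
          if taxonomy_dict.contains main_category = false then
            taxonomy_dict.insert main_category [sub_category]
          else
            taxonomy_dict.modify main_category [] (· ++ [sub_category])
      | _ => taxonomy_dict   -- Python raises ValueError here; excluded by Pre_
    ) PySem.Dict.empty).items

-- ===== PORT B =====
-- Source B's unpacking raises on a bad split (excluded by Pre_); the default pair is arbitrary there
def pvSplit2 (category : String) : String × String :=
  let parts := (PySem.Str.split? category " >> ").getD []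
  (parts.headD "", parts.tail.headD "")

def generate_taxonomy_alt (categories : List String) : List (String × List String) :=
  let pairs := categories.map pvSplit2
  let keys := PySem.List.dedup (pairs.map (·.1))
  keys.map (fun k => (k, (pairs.filter (fun p => p.1 == k)).map (·.2)))

-- ===== PRECONDITION & SPEC =====
-- Pre_ excludes exactly the inputs on which A raises ValueError (split not in exactly two parts)
def Pre_generate_taxonomy (categories : List String) : Prop :=
  categories.all (fun c => ((PySem.Str.split? c " >> ").getD []).length == 2) = true
instance (categories : List String) : Decidable (Pre_generate_taxonomy categories) := by
  unfold Pre_generate_taxonomy; infer_instance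

def pvWitness_generate_taxonomy : List String := ["a >> b", "c >> d", "a >> e"]

def Spec_generate_taxonomy (categories : List String) (out : List (String × List String)) : Prop := out = generate_taxonomy_alt categories
instance (categories : List String) (out : List (String × List String)) : Decidable (Spec_generate_taxonomy categories out) := by unfold Spec_generate_taxonomy; infer_instance

-- ===== CLAIM (what is proved, stated in full; the proofs are below) =====
def Claim_equal_generate_taxonomy : Prop := ∀ (categories : List String), Dom_generate_taxonomy categories → Pre_generate_taxonomy categories → Spec_generate_taxonomy categories (generate_taxonomy categories)

-- ===== LEMMAS AND PROOFS =====

-- Under Pre_, A's per-element step equals the uniform modify-append step on the split pair.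
theorem pv_step_eq (d : PySem.Dict String (List String)) (c : String)
    (h : ((PySem.Str.split? c " >> ").getD []).length = 2) :
    (match (PySem.Str.split? c " >> ").getD [] with
     | [m, s] => if d.contains m = false then d.insert m [s] else d.modify m [] (· ++ [s])
     | _ => d)
    = d.modify (pvSplit2 c).1 [] (· ++ [(pvSplit2 c).2]) := by
  unfold pvSplit2
  match hs : (PySem.Str.split? c " >> ").getD [] with
  | [m, s] =>
      simp only
      by_cases hc : d.contains m = false
      · rw [if_pos hc]
        show d.insert m [s] = d.insert m (d.getD ([m, s].headD "") [] ++ [[m, s].tail.headD ""])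
        simp only [List.headD, List.tail]
        rw [PySem.Dict.getD_of_not_contains d [] hc, List.nil_append]
      · rw [if_neg hc]
        simp
  | [] => rw [hs] at h; simp at h
  | [_] => rw [hs] at h; simp at h
  | _ :: _ :: _ :: _ => rw [hs] at h; simp at h

theorem generate_taxonomy_spec' (categories : List String)
    (hpre : Pre_generate_taxonomy categories) :
    generate_taxonomy categories = generate_taxonomy_alt categories := by
  unfold generate_taxonomy generate_taxonomy_alt
  simp only
  have hstep : categories.foldl (fun taxonomy_dict category =>
      match (PySem.Str.split? category " >> ").getD [] with
      | [main_category, sub_category] =>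
          if taxonomy_dict.contains main_category = false then
            taxonomy_dict.insert main_category [sub_category]
          else
            taxonomy_dict.modify main_category [] (· ++ [sub_category])
      | _ => taxonomy_dict) PySem.Dict.empty
      = (categories.map pvSplit2).foldl
          (fun d p => d.modify p.1 [] (· ++ [p.2])) PySem.Dict.empty := by
    rw [List.foldl_map]
    apply PySem.List.foldl_congr_mem
    intro d c hc
    have h2 : ((PySem.Str.split? c " >> ").getD []).length = 2 := by
      unfold Pre_generate_taxonomy at hpre
      rw [List.all_eq_true] at hpre
      simpa using hpre c hc
    exact pv_step_eq d c h2
  rw [hstep]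
  set pairs := categories.map pvSplit2 with hp
  set D := pairs.foldl (fun d p => d.modify p.1 [] (· ++ [p.2])) PySem.Dict.empty with hD
  have hnd : D.keys.Nodup := by
    rw [hD]
    exact PySem.Dict.nodup_keys_foldl_modify_key pairs Prod.fst [] _ _ PySem.Dict.nodup_keys_empty
  have hkeys : D.keys = PySem.List.dedup (pairs.map (·.1)) := by
    rw [hD, PySem.Dict.keys_foldl_modify_key]
    simp [PySem.Set.update_nil_left]
  rw [PySem.Dict.items_eq_map_keys D hnd [], hkeys]
  apply List.map_congr_left
  intro k _
  rw [hD, PySem.Dict.getD_foldl_modify_append]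
  simp

-- ===== VERDICT (by name: the statement is the Claim_ definition above) =====
theorem generate_taxonomy_spec : Claim_equal_generate_taxonomy := by
  intro categories _ hpre
  exact generate_taxonomy_spec' categories hpre
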